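-- pv_equiv track=rewrite | github.com/pete-speth/advent-of-code-2025 | solutions/day02.py | next_invalid_multiple_repeat
-- ===== SOURCE A (Python) =====
-- def next_invalid_multiple_repeat(n):
--    def next_invalid_with(n_segments):
--       s = str(n)
--
--       if len(s) % n_segments != 0:
--          return None
--
--       seg_size = len(s) // n_segments
--       if seg_size < 1:
--          return None
--
--       # find the first segment that differs, or use the last segment
--       seg1 = s[:seg_size]
--       seg_number = 2
--       comparison_seg = s[seg_size * (seg_number - 1): seg_size * seg_number]
--       while seg_number < n_segments and seg1 == comparison_seg:
--          seg_number += 1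
--          comparison_seg = s[seg_size * (seg_number - 1): seg_size * seg_number]
--
--       # if seg1 is not greater than the comparison segment
--       # we need to add 1 to it
--       if seg1 <= comparison_seg:
--          seg1 = str(int(seg1) + 1)
--          if len(seg1) > len(comparison_seg):
--             # seg1 added a digit, no solution
--             return None
--
--       return int(seg1 * n_segments)
--
--
--    # get values for all possible number of repeating segments (up to the number of digits)
--    num_digits = len(str(n))
--    invalids = []
--    for i in range(2, num_digits + 1):
--       invalid = next_invalid_with(n_segments=i)
--       if invalid is not None:
--          invalids.append(invalid)
--
--    # if there were no solutions, try again with an additional digit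
--    if len(invalids) == 0:
--       return next_invalid_multiple_repeat(int("1" + "0" * num_digits))
--
--    # otherwise, return the minimum invalid value
--    return min(invalids)
-- ===== SOURCE B (Python) =====
-- def next_invalid_multiple_repeat(n):
--     def is_repeated(m):
--         s = str(m)
--         return any(len(s) % p == 0 and s == s[:p] * (len(s) // p)
--                    for p in range(1, len(s)))
--     m = n + 1
--     while not is_repeated(m):
--         m += 1
--     return m
-- ===== Notes on version B (the rewrite author's own statement) =====
-- stated objective: simpler
-- what changed: B replaces A's whole construction (build, for every admissible segment count, the smallest repeated candidate above n by block comparison and increment, collect them, take the minimum, and recurse onto the next power of ten when none exists) by a plain upward scan: starting at n+1 it returns the first integer whose decimal string is periodic (equal to its length-p prefix repeated, for some proper divisor p), with no candidate construction, no minimum and no recursion.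
import Mathlib
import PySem

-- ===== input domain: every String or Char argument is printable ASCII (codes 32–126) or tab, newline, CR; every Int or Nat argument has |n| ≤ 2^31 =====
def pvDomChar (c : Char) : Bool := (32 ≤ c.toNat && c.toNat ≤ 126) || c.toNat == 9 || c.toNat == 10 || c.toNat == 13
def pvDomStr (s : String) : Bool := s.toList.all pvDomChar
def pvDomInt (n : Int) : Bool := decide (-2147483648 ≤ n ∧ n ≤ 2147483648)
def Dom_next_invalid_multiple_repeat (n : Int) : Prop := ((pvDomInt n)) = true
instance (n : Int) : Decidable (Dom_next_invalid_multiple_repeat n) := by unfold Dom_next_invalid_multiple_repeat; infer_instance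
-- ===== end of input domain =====

-- B replaces A's per-segment-count candidate construction + minimum + power-of-ten recursion
-- by a single upward scan from n+1 with a string-periodicity test; return values agree on
-- every n ≥ 0 (A raises ValueError on every n < 0).

-- ===== PORT A =====
-- the inner while loop of next_invalid_with (fuel only makes the loop total; it is called
-- with fuel = n_segments, more iterations than the loop can ever make)
def pvSegLoop (s : List Char) (segSize nSegments : Int) (seg1 : List Char) :
    Int → List Char → Nat → Int × List Char
  | segNumber, comparisonSeg, 0 => (segNumber, comparisonSeg)
  | segNumber, comparisonSeg, fuel+1 =>
    if segNumber < nSegments ∧ seg1 = comparisonSeg then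
      pvSegLoop s segSize nSegments seg1 (segNumber + 1)
        (PySem.List.slice s (some (segSize * ((segNumber + 1) - 1)))
          (some (segSize * (segNumber + 1)))) fuel
    else (segNumber, comparisonSeg)

-- next_invalid_with(n_segments); int(...) is ported as (ofChars? ...).getD 0 — under
-- Pre_ (n ≥ 0) the parsed strings are always digit strings, so ofChars? never misses
def pvNextInvalidWith (n : Int) (nSegments : Int) : Option Int :=
  let s := PySem.Int.toChars n
  if PySem.Int.mod (PySem.List.len s) nSegments ≠ 0 then none
  else
    let segSize := PySem.Int.floordiv (PySem.List.len s) nSegments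
    if segSize < 1 then none
    else
      let seg1 := PySem.List.slice s none (some segSize)
      let segNumber : Int := 2
      let comparisonSeg := PySem.List.slice s (some (segSize * (segNumber - 1)))
        (some (segSize * segNumber))
      let res := pvSegLoop s segSize nSegments seg1 segNumber comparisonSeg nSegments.toNat
      let comparisonSeg := res.2
      if seg1 ≤ comparisonSeg then
        let seg1' := PySem.Int.toChars ((PySem.Int.ofChars? seg1).getD 0 + 1)
        if PySem.List.len seg1' > PySem.List.len comparisonSeg then none
        else some ((PySem.Int.ofChars? (PySem.List.pyRepeat seg1' nSegments)).getD 0)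
      else some ((PySem.Int.ofChars? (PySem.List.pyRepeat seg1 nSegments)).getD 0)

-- the outer function; the self-call is fueled (fuel only makes the recursion total:
-- it is started at 64 and on every input the Python recurses at most once)
def pvAux : Nat → Int → Int
  | 0, _ => 0
  | fuel+1, n =>
    let numDigits := PySem.List.len (PySem.Int.toChars n)
    let invalids := (PySem.List.pyRange 2 (numDigits + 1) 1).foldl
      (fun acc i =>
        match pvNextInvalidWith n i with
        | some invalid => acc ++ [invalid]
        | none => acc) []
    if PySem.List.len invalids = 0 then
      pvAux fuel ((PySem.Int.ofChars? (['1'] ++ PySem.List.pyRepeat ['0'] numDigits)).getD 0)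
    else (PySem.List.min? invalids (fun x => x)).getD 0

def next_invalid_multiple_repeat (n : Int) : Int := pvAux 64 n

-- ===== PORT B =====
-- is_repeated(m): does the digit string equal its length-p prefix repeated, for some
-- proper divisor p of the length?
def pvIsRep (s : List Char) : Bool :=
  (PySem.List.pyRange 1 (PySem.List.len s) 1).any (fun p =>
    decide (PySem.Int.mod (PySem.List.len s) p = 0) &&
    decide (s = PySem.List.pyRepeat (PySem.List.slice s none (some p))
      (PySem.Int.floordiv (PySem.List.len s) p)))

-- the while loop 'm += 1 until is_repeated(m)' (fuel only makes the loop total; it is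
-- started above the largest possible gap to the next repeated number on the domain)
def pvScanUp : Nat → Int → Int
  | 0, m => m
  | fuel+1, m => if pvIsRep (PySem.Int.toChars m) then m else pvScanUp fuel (m + 1)

def next_invalid_multiple_repeat_alt (n : Int) : Int := pvScanUp 100000000000 (n + 1)

-- ===== PRECONDITION & SPEC =====
-- the Python A raises ValueError (int('-…')) on every negative n; Pre_ is exactly the
-- inputs on which A returns normally
def Pre_next_invalid_multiple_repeat (n : Int) : Prop := 0 ≤ n
instance (n : Int) : Decidable (Pre_next_invalid_multiple_repeat n) := by
  unfold Pre_next_invalid_multiple_repeat; infer_instance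
def pvWitness_next_invalid_multiple_repeat : Int := 5
def Spec_next_invalid_multiple_repeat (n : Int) (out : Int) : Prop :=
  out = next_invalid_multiple_repeat_alt n
instance (n : Int) (out : Int) : Decidable (Spec_next_invalid_multiple_repeat n out) := by
  unfold Spec_next_invalid_multiple_repeat; infer_instance

-- ===== CLAIM (what is proved, stated in full; the proofs are below) =====
def Claim_equal_next_invalid_multiple_repeat : Prop := ∀ (n : Int),
  Dom_next_invalid_multiple_repeat n → Pre_next_invalid_multiple_repeat n →
  Spec_next_invalid_multiple_repeat n (next_invalid_multiple_repeat n)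

-- ===== LEMMAS AND PROOFS =====

-- ---------------------------------------------------------------------------
-- 1. int(s) on a pure digit string: PySem.Int.ofChars? parses to the base-10 value
-- ---------------------------------------------------------------------------

theorem pvDropAll (p : Char → Bool) (l : List Char) (h : ∀ x ∈ l, p x = false) :
    List.dropWhile p l = l := by
  cases l with
  | nil => rfl
  | cons a t => simp [h a (by simp)]

theorem pvDigitNotSpace (c : Char) (h : c.isDigit = true) : PySem.Int.isIntSpace c = false := by
  simp only [PySem.Int.isIntSpace, Bool.or_eq_false_iff, decide_eq_false_iff_not]
  refine ⟨⟨⟨⟨⟨?_,?_⟩,?_⟩,?_⟩,?_⟩,?_⟩ <;> (intro he; subst he; exact absurd h (by decide))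

def pvValD (cs : List Char) : Nat := cs.foldl (fun a c => a * 10 + (c.toNat - 48)) 0

def pvDigitChars : List Char := ['0','1','2','3','4','5','6','7','8','9']

theorem pvDigit_mem (c : Char) (h : c.isDigit = true) : c ∈ pvDigitChars := by
  simp only [Char.isDigit, UInt32.le_iff_toNat_le, Bool.and_eq_true, decide_eq_true_eq,
    ge_iff_le] at h
  obtain ⟨h1, h2⟩ := h
  have e : c = Char.ofNat c.toNat := (Char.ofNat_toNat c).symm
  have hb1 : 48 ≤ c.toNat := h1
  have hb2 : c.toNat ≤ 57 := h2
  interval_cases hx : c.toNat <;> first | decide | (rw [e]; decide)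

theorem pvGoAbs (g : List Char → Bool → Nat → Option Nat)
    (hnil : ∀ b acc, g [] b acc = if b = true then some acc else none)
    (hcons : ∀ c rest b acc, c ∈ pvDigitChars →
      g (c :: rest) b acc = g rest true (acc * 10 + (c.toNat - '0'.toNat)))
    (ds : List Char) : ∀ (acc : Nat) (b : Bool), (∀ c ∈ ds, c.isDigit = true) →
      (b = true ∨ ds ≠ []) →
      g ds b acc = some (ds.foldl (fun a c => a * 10 + (c.toNat - 48)) acc) := by
  induction ds with
  | nil =>
    intro acc b _ hb
    rcases hb with hb | hb
    · simp [hnil, hb]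
    · simp at hb
  | cons c rest ih =>
    intro acc b hd _
    rw [hcons c rest b acc (pvDigit_mem c (hd c (by simp)))]
    have := ih (acc * 10 + (c.toNat - 48)) true (fun x hx => hd x (by simp [hx])) (Or.inl rfl)
    simpa using this

theorem pvParseAbs (dv : List Char → Option Nat) (g : List Char → Bool → Nat → Option Nat)
    (c : Char) (rest : List Char) (hd : ∀ x ∈ c :: rest, x.isDigit = true)
    (hdv : ∀ a b, a ∈ pvDigitChars → dv (a :: b) = g b true (0 * 10 + (a.toNat - '0'.toNat)))
    (hnil : ∀ b acc, g [] b acc = if b = true then some acc else none)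
    (hcons : ∀ a rest' b acc, a ∈ pvDigitChars →
      g (a :: rest') b acc = g rest' true (acc * 10 + (a.toNat - '0'.toNat))) :
    Option.map (fun n : Int => n) (do let a ← dv (c :: rest); pure ((a : Int)))
      = some ((pvValD (c :: rest) : Nat) : Int) := by
  rw [hdv c rest (pvDigit_mem c (hd c (by simp)))]
  rcases rest with _ | ⟨d, tail⟩
  · rw [hnil]
    simp [pvValD]
  · rw [pvGoAbs g hnil hcons (d :: tail) _ true
      (fun x hx => hd x (by simp at hx; simp [hx])) (Or.inl rfl)]
    simp [pvValD]

theorem pvParseDigits (u : List Char) (hne : u ≠ []) (hd : ∀ x ∈ u, x.isDigit = true) :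
    PySem.Int.ofChars? u = some ((pvValD u : Nat) : Int) := by
  obtain ⟨c, rest, rfl⟩ := List.exists_cons_of_ne_nil hne
  unfold PySem.Int.ofChars?
  rw [pvDropAll _ _ (fun x hx => pvDigitNotSpace x (hd x hx))]
  rw [pvDropAll _ _ (fun x hx => pvDigitNotSpace x (hd x (List.mem_reverse.mp hx)))]
  rw [List.reverse_reverse]
  simp only []
  split
  · next ds heq =>
    exact absurd (hd '-' (by rw [heq]; simp)) (by decide)
  · next ds heq =>
    exact absurd (hd '+' (by rw [heq]; simp)) (by decide)
  · next =>
    refine pvParseAbs _ ?g c rest hd ?h1 ?h2 ?h3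
    case h1 =>
      intro a b ha
      fin_cases ha <;> (conv_lhs => whnf)
    case h2 => intro b acc; cases b <;> rfl
    case h3 =>
      intro a rest' b acc ha
      fin_cases ha <;> (conv_lhs => whnf)

-- ---------------------------------------------------------------------------
-- 2. decimal strings: str(m) = Nat.toDigits 10 m, canonicity, value, order
-- ---------------------------------------------------------------------------

def pvD (m : Nat) : List Char := Nat.toDigits 10 m

def pvAllDig (s : List Char) : Prop := ∀ c ∈ s, c.isDigit = true

def pvCanon (s : List Char) : Prop := s ≠ [] ∧ pvAllDig s ∧ (s.head? = some '0' → s = ['0'])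

theorem pvToChars_nonneg (n : Int) (h : 0 ≤ n) : PySem.Int.toChars n = pvD n.toNat := by
  unfold PySem.Int.toChars pvD
  rw [if_neg (by omega)]

theorem pvToDigitsCore_eq (fuel : Nat) : ∀ (n : Nat) (ds : List Char), 0 < n → n < fuel →
    Nat.toDigitsCore 10 fuel n ds = ((Nat.digits 10 n).map Nat.digitChar).reverse ++ ds := by
  induction fuel with
  | zero => intro n ds h1 h2; omega
  | succ fuel ih =>
    intro n ds h1 h2
    rw [show Nat.toDigitsCore 10 (fuel+1) n ds
      = if n / 10 = 0 then (n % 10).digitChar :: ds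
        else Nat.toDigitsCore 10 fuel (n / 10) ((n % 10).digitChar :: ds) from rfl]
    rw [Nat.digits_def' (by norm_num : (1:Nat) < 10) h1]
    by_cases hz : n / 10 = 0
    · rw [if_pos hz, hz]
      simp
    · rw [if_neg hz]
      rw [ih (n / 10) ((n % 10).digitChar :: ds) (Nat.pos_of_ne_zero hz)
        (by have := Nat.div_lt_self h1 (by norm_num : (1:Nat) < 10); omega)]
      simp

theorem pvD_zero : pvD 0 = ['0'] := by decide

theorem pvD_pos (m : Nat) (h : 0 < m) :
    pvD m = ((Nat.digits 10 m).map Nat.digitChar).reverse := by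
  unfold pvD Nat.toDigits
  rw [pvToDigitsCore_eq (m + 1) m [] h (by omega), List.append_nil]

theorem pvDigitChar_toNat (d : Nat) (h : d < 10) : (Nat.digitChar d).toNat = 48 + d := by
  interval_cases d <;> decide

theorem pvDigitChar_isDigit (d : Nat) (h : d < 10) : (Nat.digitChar d).isDigit = true := by
  interval_cases d <;> decide

theorem pvDigitChar_ne_zero (d : Nat) (h : d < 10) (h0 : d ≠ 0) : Nat.digitChar d ≠ '0' := by
  interval_cases d <;> simp_all <;> decide

theorem pvValD_foldl (v : List Char) : ∀ a : Nat,
    v.foldl (fun x c => x * 10 + (c.toNat - 48)) a = a * 10 ^ v.length + pvValD v := by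
  induction v with
  | nil => intro a; simp [pvValD]
  | cons c w ih =>
    intro a
    have hv : pvValD (c :: w) = (c.toNat - 48) * 10 ^ w.length + pvValD w := by
      unfold pvValD
      simp only [List.foldl_cons, Nat.zero_mul, Nat.zero_add]
      rw [ih]
      rfl
    simp only [List.foldl_cons, hv, List.length_cons]
    rw [ih]
    ring

theorem pvValD_append (u v : List Char) :
    pvValD (u ++ v) = pvValD u * 10 ^ v.length + pvValD v := by
  unfold pvValD
  rw [List.foldl_append, pvValD_foldl]
  rfl

theorem pvDigit_bounds (c : Char) (h : c.isDigit = true) : 48 ≤ c.toNat ∧ c.toNat ≤ 57 := by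
  simp only [Char.isDigit, UInt32.le_iff_toNat_le, Bool.and_eq_true, decide_eq_true_eq,
    ge_iff_le] at h
  exact ⟨h.1, h.2⟩

theorem pvChar_eq_of_toNat (c d : Char) (h : c.toNat = d.toNat) : c = d := by
  have : c.val = d.val := by
    have h1 : c.val.toNat = d.val.toNat := h
    exact UInt32.toNat_inj.mp h1
  exact Char.ext this

theorem pvValD_cons (c : Char) (w : List Char) :
    pvValD (c :: w) = (c.toNat - 48) * 10 ^ w.length + pvValD w := by
  unfold pvValD
  simp only [List.foldl_cons, Nat.zero_mul, Nat.zero_add]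
  rw [pvValD_foldl]
  rfl

theorem pvValD_lt (u : List Char) (hd : pvAllDig u) : pvValD u < 10 ^ u.length := by
  induction u with
  | nil => simp [pvValD]
  | cons c w ih =>
    have hb := pvDigit_bounds c (hd c (by simp))
    have hw := ih (fun x hx => hd x (by simp [hx]))
    rw [pvValD_cons, List.length_cons, pow_succ]
    have h9 : c.toNat - 48 ≤ 9 := by omega
    have := Nat.mul_le_mul_right (10 ^ w.length) h9
    omega

theorem pvValD_ge (c : Char) (rest : List Char) (hd : pvAllDig (c :: rest)) (h0 : c ≠ '0') :
    10 ^ rest.length ≤ pvValD (c :: rest) := by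
  have hb := pvDigit_bounds c (hd c (by simp))
  have h48 : c.toNat ≠ 48 := by
    intro he
    exact h0 (pvChar_eq_of_toNat c '0' (by rw [he]; rfl))
  rw [pvValD_cons]
  have h1 : 1 ≤ c.toNat - 48 := by omega
  have := Nat.mul_le_mul_right (10 ^ rest.length) h1
  omega

theorem pvValD_replicate_zero (d : Nat) : pvValD (List.replicate d '0') = 0 := by
  induction d with
  | zero => rfl
  | succ d ih =>
    rw [List.replicate_succ, pvValD_cons, ih]
    simp

theorem pvValD_rev_map (l : List Nat) (h : ∀ d ∈ l, d < 10) :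
    pvValD ((l.map Nat.digitChar).reverse) = Nat.ofDigits 10 l := by
  induction l with
  | nil => rfl
  | cons d l ih =>
    rw [List.map_cons, List.reverse_cons, pvValD_append,
      ih (fun x hx => h x (by simp [hx])), Nat.ofDigits_cons]
    have hd10 := h d (by simp)
    have h1 : pvValD [Nat.digitChar d] = d := by
      rw [show [Nat.digitChar d] = Nat.digitChar d :: [] from rfl, pvValD_cons,
        pvDigitChar_toNat d hd10]
      simp [pvValD]
    rw [h1]
    simp
    ring

theorem pvD_canon (m : Nat) : pvCanon (pvD m) := by
  rcases Nat.eq_zero_or_pos m with rfl | hm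
  · rw [pvD_zero]
    exact ⟨by simp, by intro c hc; simp at hc; rw [hc]; rfl, fun _ => rfl⟩
  · rw [pvD_pos m hm]
    have hdig : Nat.digits 10 m ≠ [] := Nat.digits_ne_nil_iff_ne_zero.mpr (by omega : m ≠ 0)
    refine ⟨by simpa using hdig, ?_, ?_⟩
    · intro c hc
      simp only [List.mem_reverse, List.mem_map] at hc
      obtain ⟨d, hd, rfl⟩ := hc
      exact pvDigitChar_isDigit d (Nat.digits_lt_base (by norm_num) hd)
    · intro hhead
      exfalso
      rw [List.head?_reverse, List.getLast?_map,
        List.getLast?_eq_some_getLast hdig] at hhead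
      simp only [Option.map_some, Option.some_inj] at hhead
      have hlt := Nat.digits_lt_base (by norm_num : (1:Nat) < 10) (List.getLast_mem hdig)
      exact pvDigitChar_ne_zero _ hlt (Nat.getLast_digit_ne_zero 10 (by omega)) hhead

theorem pvValD_D (m : Nat) : pvValD (pvD m) = m := by
  rcases Nat.eq_zero_or_pos m with rfl | hm
  · rw [pvD_zero]; rfl
  · rw [pvD_pos m hm,
      pvValD_rev_map _ (fun d hd => Nat.digits_lt_base (by norm_num) hd),
      Nat.ofDigits_digits]

theorem pvD_len_le (m e : Nat) (he : 0 < e) (h : m < 10 ^ e) : (pvD m).length ≤ e :=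
  Nat.toDigits_length 10 m e he h

theorem pvD_lt_pow (m : Nat) : m < 10 ^ (pvD m).length := by
  have := pvValD_lt (pvD m) (pvD_canon m).2.1
  rw [pvValD_D] at this
  exact this

theorem pvD_pow_le (m : Nat) (h : m ≠ 0) : 10 ^ ((pvD m).length - 1) ≤ m := by
  obtain ⟨hne, hdig, hhead⟩ := pvD_canon m
  obtain ⟨c, w, hcw⟩ := List.exists_cons_of_ne_nil hne
  have hc0 : c ≠ '0' := by
    intro hc
    have e : pvD m = ['0'] := hhead (by rw [hcw, hc]; rfl)
    have hv := pvValD_D m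
    rw [e] at hv
    exact h (by rw [← hv]; decide)
  have := pvValD_ge c w (by rw [← hcw]; exact hdig) hc0
  rw [← hcw] at this
  rw [pvValD_D] at this
  rw [hcw]
  simpa using this

theorem pvD_len_pos (m : Nat) : 0 < (pvD m).length := by
  have := (pvD_canon m).1
  cases h : pvD m with
  | nil => exact absurd h this
  | cons a l => simp

theorem pvD_len_mono (a b : Nat) (h : a ≤ b) : (pvD a).length ≤ (pvD b).length := by
  exact pvD_len_le a _ (pvD_len_pos b) (lt_of_le_of_lt h (pvD_lt_pow b))

theorem pvLt_of_len_lt (a b : Nat) (h : (pvD a).length < (pvD b).length) : a < b := by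
  by_contra hab
  exact absurd (pvD_len_mono b a (by omega)) (by omega)

-- lexicographic facts on List Char (specific combinations of List.Lex used by the ports)
theorem pvLexCons {a b : Char} {l m : List Char} :
    List.Lex (· < ·) (a :: l) (b :: m) ↔ a < b ∨ (a = b ∧ List.Lex (· < ·) l m) := by
  constructor
  · intro h
    cases h with
    | rel h => exact Or.inl h
    | cons h => exact Or.inr ⟨rfl, h⟩
  · rintro (h | ⟨rfl, h⟩)
    · exact List.Lex.rel h
    · exact List.Lex.cons h

theorem pvLexAppendCancel (a u v : List Char) :
    List.Lex (· < ·) (a ++ u) (a ++ v) ↔ List.Lex (· < ·) u v := by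
  induction a with
  | nil => simp
  | cons c a ih => simpa [pvLexCons] using ih

theorem pvListLtIff (l m : List Char) : l < m ↔ List.Lex (· < ·) l m := Iff.rfl

theorem pvListLeIff (l m : List Char) : l ≤ m ↔ ¬ List.Lex (· < ·) m l := by
  rw [← pvListLtIff]; exact not_lt.symm

theorem pvLeAppendCancel (a u v : List Char) : a ++ u ≤ a ++ v ↔ u ≤ v := by
  rw [pvListLeIff, pvListLeIff, pvLexAppendCancel]

theorem pvLexAppendNe (x y u v : List Char) (hlen : x.length = y.length) (hne : x ≠ y) :
    (List.Lex (· < ·) (x ++ u) (y ++ v) ↔ List.Lex (· < ·) x y) := by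
  induction x generalizing y with
  | nil => cases y with
    | nil => exact absurd rfl hne
    | cons b m => simp at hlen
  | cons a l ih =>
    cases y with
    | nil => simp at hlen
    | cons b m =>
      simp only [List.cons_append, pvLexCons]
      by_cases hab : a = b
      · subst hab
        have hne' : l ≠ m := fun h => hne (by rw [h])
        have := ih m (by simpa using hlen) hne'
        simp [this]
      · simp [hab]

theorem pvLeAppendNe (x y u v : List Char) (hlen : x.length = y.length) (hne : x ≠ y) :
    (x ++ u ≤ y ++ v ↔ x ≤ y) := by
  rw [pvListLeIff, pvListLeIff, pvLexAppendNe y x v u hlen.symm (fun h => hne h.symm)]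

-- digit strings of equal length compare lexicographically like their values
theorem pvLex_lt_val (u : List Char) : ∀ (v : List Char), pvAllDig u → pvAllDig v →
    u.length = v.length → List.Lex (· < ·) u v → pvValD u < pvValD v := by
  induction u with
  | nil =>
    intro v _ _ hlen hlex
    have : v = [] := by
      cases v with
      | nil => rfl
      | cons b m => simp at hlen
    rw [this] at hlex
    cases hlex
  | cons a l ih =>
    intro v hdu hdv hlen hlex
    cases v with
    | nil => simp at hlen
    | cons b m =>
      have hlen' : l.length = m.length := by simpa using hlen
      rw [pvLexCons] at hlex
      have hba := pvDigit_bounds a (hdu a (by simp))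
      have hbb := pvDigit_bounds b (hdv b (by simp))
      rw [pvValD_cons, pvValD_cons, hlen']
      rcases hlex with hab | ⟨rfl, hlm⟩
      · have htn : a.toNat < b.toNat := by
          have := Char.lt_def.mp hab
          exact this
        have hlv := pvValD_lt l (fun x hx => hdu x (by simp [hx]))
        rw [hlen'] at hlv
        have hm1 : (a.toNat - 48) + 1 ≤ b.toNat - 48 := by omega
        have hm2 : ((a.toNat - 48) + 1) * 10 ^ m.length ≤ (b.toNat - 48) * 10 ^ m.length :=
          Nat.mul_le_mul_right _ hm1
        have hm3 : (a.toNat - 48) * 10 ^ m.length + 10 ^ m.length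
            ≤ (b.toNat - 48) * 10 ^ m.length := by
          calc (a.toNat - 48) * 10 ^ m.length + 10 ^ m.length
              = ((a.toNat - 48) + 1) * 10 ^ m.length := by ring
          _ ≤ _ := hm2
        omega
      · have := ih m (fun x hx => hdu x (by simp [hx])) (fun x hx => hdv x (by simp [hx]))
          hlen' hlm
        omega

theorem pvLex_lt_iff (u v : List Char) (hdu : pvAllDig u) (hdv : pvAllDig v)
    (hlen : u.length = v.length) : u < v ↔ pvValD u < pvValD v := by
  constructor
  · intro h
    exact pvLex_lt_val u v hdu hdv hlen h
  · intro h
    rcases lt_trichotomy u v with hl | he | hg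
    · exact hl
    · rw [he] at h; omega
    · have := pvLex_lt_val v u hdv hdu hlen.symm hg
      omega

theorem pvLex_le_iff (u v : List Char) (hdu : pvAllDig u) (hdv : pvAllDig v)
    (hlen : u.length = v.length) : u ≤ v ↔ pvValD u ≤ pvValD v := by
  rw [pvListLeIff]
  rw [show (List.Lex (· < ·) v u ↔ pvValD v < pvValD u) from
    pvLex_lt_iff v u hdv hdu hlen.symm]
  omega

theorem pvValD_inj (u v : List Char) (hdu : pvAllDig u) (hdv : pvAllDig v)
    (hlen : u.length = v.length) (h : pvValD u = pvValD v) : u = v := by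
  have h1 : u ≤ v := (pvLex_le_iff u v hdu hdv hlen).mpr (by omega)
  have h2 : v ≤ u := (pvLex_le_iff v u hdv hdu hlen.symm).mpr (by omega)
  exact le_antisymm h1 h2

theorem pvPow_len_eq (a b m : Nat) (ha : 0 < a) (hb : 0 < b)
    (ha1 : 10 ^ (a - 1) ≤ m) (ha2 : m < 10 ^ a)
    (hb1 : 10 ^ (b - 1) ≤ m) (hb2 : m < 10 ^ b) : a = b := by
  by_contra hne
  rcases Nat.lt_or_ge a b with hab | hab
  · have : 10 ^ a ≤ 10 ^ (b - 1) := Nat.pow_le_pow_right (by norm_num) (by omega)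
    omega
  · have hba : b < a := by omega
    have : 10 ^ b ≤ 10 ^ (a - 1) := Nat.pow_le_pow_right (by norm_num) (by omega)
    omega

theorem pvD_valD (u : List Char) (hc : pvCanon u) : pvD (pvValD u) = u := by
  obtain ⟨hne, hdig, hhead⟩ := hc
  obtain ⟨c, w, rfl⟩ := List.exists_cons_of_ne_nil hne
  by_cases hc0 : c = '0'
  · have := hhead (by rw [hc0]; rfl)
    rw [this]
    rw [show pvValD ['0'] = 0 from rfl, pvD_zero]
  · have hge := pvValD_ge c w hdig hc0
    have hlt := pvValD_lt (c :: w) hdig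
    set m := pvValD (c :: w) with hm
    have hm0 : m ≠ 0 := by
      have : (0:Nat) < 10 ^ w.length := Nat.pow_pos (by norm_num)
      omega
    have hlen : (pvD m).length = (c :: w).length := by
      refine pvPow_len_eq _ _ m (pvD_len_pos m) (by simp) ?_ (pvD_lt_pow m) ?_ ?_
      · exact pvD_pow_le m hm0
      · simpa using hge
      · simpa using hlt
    exact pvValD_inj _ _ (pvD_canon m).2.1 hdig hlen (by rw [pvValD_D])

-- ---------------------------------------------------------------------------
-- 3. repeated (periodic) digit strings
-- ---------------------------------------------------------------------------

theorem pvPyRepeat_cast {α : Type} (xs : List α) (m : Nat) :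
    PySem.List.pyRepeat xs (m : Int) = (List.replicate m xs).flatten := by
  simp [PySem.List.pyRepeat]

def pvRep (u : List Char) (k : Nat) : List Char := (List.replicate k u).flatten

theorem pvRep_succ (u : List Char) (k : Nat) : pvRep u (k + 1) = u ++ pvRep u k := by
  simp [pvRep, List.replicate_succ]

theorem pvRep_length (u : List Char) (k : Nat) : (pvRep u k).length = k * u.length := by
  simp [pvRep, List.length_flatten]

theorem pvRep_allDig (u : List Char) (k : Nat) (h : pvAllDig u) : pvAllDig (pvRep u k) := by
  intro c hc
  simp only [pvRep, List.mem_flatten, List.mem_replicate] at hc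
  obtain ⟨l, ⟨_, rfl⟩, hcl⟩ := hc
  exact h c hcl

theorem pvRep_take (u : List Char) (k : Nat) (hk : 0 < k) :
    (pvRep u k).take u.length = u := by
  obtain ⟨k', rfl⟩ : ∃ k', k = k' + 1 := ⟨k - 1, by omega⟩
  rw [pvRep_succ, List.take_left]

theorem pvRep_head? (u : List Char) (k : Nat) (hk : 0 < k) (hu : u ≠ []) :
    (pvRep u k).head? = u.head? := by
  obtain ⟨k', rfl⟩ : ∃ k', k = k' + 1 := ⟨k - 1, by omega⟩
  rw [pvRep_succ]
  cases u with
  | nil => exact absurd rfl hu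
  | cons a l => rfl

theorem pvRep_singleton (c : Char) (k : Nat) : pvRep [c] k = List.replicate k c := by
  induction k with
  | zero => rfl
  | succ k ih => rw [pvRep_succ, ih, List.replicate_succ]; rfl

theorem pvRep_ne_nil (u : List Char) (k : Nat) (hk : 0 < k) (hu : u ≠ []) :
    pvRep u k ≠ [] := by
  obtain ⟨k', rfl⟩ : ∃ k', k = k' + 1 := ⟨k - 1, by omega⟩
  rw [pvRep_succ]
  simp [hu]

-- numeric periodicity: m's digit string is its length-p prefix repeated
def pvPerP (p m : Nat) : Prop :=
  0 < p ∧ p < (pvD m).length ∧ (pvD m).length % p = 0 ∧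
    pvD m = pvRep ((pvD m).take p) ((pvD m).length / p)

def pvRepN (m : Nat) : Prop := ∃ p, pvPerP p m

theorem pvIsRep_iff (s : List Char) : pvIsRep s = true ↔
    ∃ p : Nat, 0 < p ∧ p < s.length ∧ s.length % p = 0 ∧ s = pvRep (s.take p) (s.length / p) := by
  unfold pvIsRep
  rw [List.any_eq_true]
  constructor
  · rintro ⟨p, hmem, hp⟩
    rw [PySem.List.mem_pyRange_one] at hmem
    obtain ⟨hp1, hplt⟩ := hmem
    simp only [Bool.and_eq_true, decide_eq_true_eq] at hp
    obtain ⟨hmod, heq⟩ := hp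
    have h0 : (0:Int) ≤ p := by omega
    obtain ⟨pN, rfl⟩ : ∃ m : Nat, p = (m : Int) := ⟨p.toNat, (Int.toNat_of_nonneg h0).symm⟩
    rw [PySem.List.len_eq] at hplt hmod heq
    rw [PySem.Int.mod_natCast] at hmod
    rw [PySem.List.slice_to_natCast, PySem.Int.floordiv_natCast, pvPyRepeat_cast] at heq
    exact ⟨pN, by exact_mod_cast hp1, by exact_mod_cast hplt, by exact_mod_cast hmod, heq⟩
  · rintro ⟨pN, hp1, hplt, hmod, heq⟩
    refine ⟨(pN : Int), ?_, ?_⟩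
    · rw [PySem.List.mem_pyRange_one, PySem.List.len_eq]
      constructor <;> [exact_mod_cast hp1; exact_mod_cast hplt]
    · simp only [Bool.and_eq_true, decide_eq_true_eq]
      rw [PySem.List.len_eq, PySem.Int.mod_natCast, PySem.List.slice_to_natCast,
        PySem.Int.floordiv_natCast, pvPyRepeat_cast]
      exact ⟨by exact_mod_cast hmod, heq⟩

-- ---------------------------------------------------------------------------
-- 4. A's inner while loop and per-segment-count candidate (string level)
-- ---------------------------------------------------------------------------

-- pvNextInvalidWith as a function of the digit string s = str(n)
def pvNIW (s : List Char) (nSegments : Int) : Option Int :=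
  if PySem.Int.mod (PySem.List.len s) nSegments ≠ 0 then none
  else
    let segSize := PySem.Int.floordiv (PySem.List.len s) nSegments
    if segSize < 1 then none
    else
      let seg1 := PySem.List.slice s none (some segSize)
      let segNumber : Int := 2
      let comparisonSeg := PySem.List.slice s (some (segSize * (segNumber - 1)))
        (some (segSize * segNumber))
      let res := pvSegLoop s segSize nSegments seg1 segNumber comparisonSeg nSegments.toNat
      let comparisonSeg := res.2
      if seg1 ≤ comparisonSeg then
        let seg1' := PySem.Int.toChars ((PySem.Int.ofChars? seg1).getD 0 + 1)
        if PySem.List.len seg1' > PySem.List.len comparisonSeg then none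
        else some ((PySem.Int.ofChars? (PySem.List.pyRepeat seg1' nSegments)).getD 0)
      else some ((PySem.Int.ofChars? (PySem.List.pyRepeat seg1 nSegments)).getD 0)

-- the candidate for one segment SIZE p, phrased with one whole-string comparison
def pvBcand (s : List Char) (p : Int) : Option Int :=
  if PySem.Int.mod (PySem.List.len s) p = 0 then
    let k := PySem.Int.floordiv (PySem.List.len s) p
    let t := PySem.List.slice s none (some p)
    let t := if PySem.List.pyRepeat t k ≤ s then
        PySem.Int.toChars ((PySem.Int.ofChars? t).getD 0 + 1)
      else t
    if PySem.List.len t ≤ p then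
      some ((PySem.Int.ofChars? (PySem.List.pyRepeat t k)).getD 0)
    else none
  else none

def pvCands (s : List Char) : List Int :=
  (PySem.List.pyRange 1 (PySem.List.len s) 1).filterMap (pvBcand s)

def pvACands (s : List Char) : List Int :=
  (PySem.List.pyRange 2 (PySem.List.len s + 1) 1).filterMap (pvNIW s)

-- ---- the while loop computes a segment whose comparison with seg1 decides t*k ≤ s ----
theorem pvSegExit (s t : List Char) (pN kN jN : Nat)
    (_hp : 1 ≤ pN) (hk : 2 ≤ kN) (hlen : s.length = kN * pN) (ht : t = s.take pN)
    (hj2 : 2 ≤ jN) (hjk : jN ≤ kN)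
    (hstop : jN = kN ∨ t ≠ (s.drop ((jN-1)*pN)).take pN)
    (hpref : s.take ((jN-1)*pN) = List.flatten (List.replicate (jN-1) t)) :
    (((s.drop ((jN-1)*pN)).take pN).length = pN) ∧
    ((t ≤ (s.drop ((jN-1)*pN)).take pN) ↔ (List.flatten (List.replicate kN t) ≤ s)) := by
  have hmul : jN * pN ≤ kN * pN := Nat.mul_le_mul_right _ hjk
  have hj1 : (jN - 1) * pN + pN = jN * pN := by
    have h : jN - 1 + 1 = jN := by omega
    calc (jN - 1) * pN + pN = ((jN - 1) + 1) * pN := (Nat.succ_mul _ _).symm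
    _ = jN * pN := by rw [h]
  have hplen : pN ≤ s.length - (jN - 1) * pN := by
    apply Nat.le_sub_of_add_le
    rw [Nat.add_comm, hj1, hlen]
    exact hmul
  have hseglen : ((s.drop ((jN-1)*pN)).take pN).length = pN := by
    simp only [List.length_take, List.length_drop]
    omega
  refine ⟨hseglen, ?_⟩
  have htlen : t.length = pN := by
    rw [ht, List.length_take, hlen]
    have : pN ≤ kN * pN := Nat.le_mul_of_pos_left pN (by omega)
    omega
  have hsdecomp : s = List.flatten (List.replicate (jN-1) t) ++ s.drop ((jN-1)*pN) := by
    conv_lhs => rw [← List.take_append_drop ((jN-1)*pN) s, hpref]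
  have hrep : List.flatten (List.replicate kN t)
      = List.flatten (List.replicate (jN-1) t) ++ List.flatten (List.replicate (kN-jN+1) t) := by
    rw [← List.flatten_append, ← List.replicate_add]
    congr 2
    omega
  have key : (List.flatten (List.replicate kN t) ≤ s)
      ↔ (List.flatten (List.replicate (kN-jN+1) t) ≤ s.drop ((jN-1)*pN)) := by
    conv_lhs => rw [hrep, hsdecomp]
    exact pvLeAppendCancel _ _ _
  rw [key]
  have hdropdecomp : s.drop ((jN-1)*pN)
      = (s.drop ((jN-1)*pN)).take pN ++ s.drop (jN*pN) := by
    conv_lhs => rw [← List.take_append_drop pN (s.drop ((jN-1)*pN))]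
    rw [List.drop_drop, hj1]
  have hrep2 : List.flatten (List.replicate (kN-jN+1) t)
      = t ++ List.flatten (List.replicate (kN-jN) t) := by
    rw [show kN-jN+1 = (kN-jN)+1 from rfl, List.replicate_succ, List.flatten_cons]
  by_cases hne : t = (s.drop ((jN-1)*pN)).take pN
  · have hj : jN = kN := by
      rcases hstop with hj | hne'
      · exact hj
      · exact absurd hne hne'
    have hz1 : kN - jN + 1 = 1 := by omega
    have hdropnil : List.drop (jN*pN) s = [] := by
      apply List.drop_eq_nil_of_le
      rw [hlen, hj]
    constructor
    · intro _
      rw [hz1]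
      conv_rhs => rw [hdropdecomp, hdropnil, List.append_nil]
      rw [← hne]
      simp
    · intro _
      rw [← hne]
  · rw [hrep2]
    conv_rhs => rw [hdropdecomp]
    exact (pvLeAppendNe t _ _ _ (by rw [htlen, hseglen]) hne).symm

theorem pvSegLoop_spec (fuel : Nat) (s t : List Char) (pN kN jN : Nat)
    (hp : 1 ≤ pN) (hk : 2 ≤ kN) (hlen : s.length = kN * pN) (ht : t = s.take pN)
    (hj2 : 2 ≤ jN) (hjk : jN ≤ kN) (hfuel : kN - jN ≤ fuel)
    (hpref : s.take ((jN-1)*pN) = List.flatten (List.replicate (jN-1) t)) :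
    ((pvSegLoop s (pN : Int) (kN : Int) t (jN : Int)
        ((s.drop ((jN-1)*pN)).take pN) fuel).2.length = pN) ∧
    ((t ≤ (pvSegLoop s (pN : Int) (kN : Int) t (jN : Int)
        ((s.drop ((jN-1)*pN)).take pN) fuel).2) ↔
      (List.flatten (List.replicate kN t) ≤ s)) := by
  induction fuel generalizing jN with
  | zero =>
    have hj : jN = kN := by omega
    simpa [pvSegLoop] using
      pvSegExit s t pN kN jN hp hk hlen ht hj2 hjk (Or.inl hj) hpref
  | succ fuel ih =>
    by_cases hcond : ((jN : Int) < (kN : Int) ∧ t = (s.drop ((jN-1)*pN)).take pN)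
    · have hjlt : jN < kN := by exact_mod_cast hcond.1
      have heq := hcond.2
      simp only [pvSegLoop]
      rw [if_pos hcond]
      have harg1 : (jN : Int) + 1 = ((jN + 1 : Nat) : Int) := by push_cast; ring
      have harg2 : (pN : Int) * ((jN : Int) + 1 - 1) = ((pN * jN : Nat) : Int) := by
        push_cast; ring
      have harg3 : (pN : Int) * ((jN : Int) + 1) = ((pN * (jN + 1) : Nat) : Int) := by
        push_cast; ring
      rw [harg2, harg3, PySem.List.slice_natCast]
      have harg4 : pN * (jN + 1) - pN * jN = pN := by
        simp [Nat.mul_succ]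
      rw [harg4, harg1]
      have hdrop : pN * jN = (jN + 1 - 1) * pN := by
        simp [Nat.mul_comm]
      rw [hdrop]
      have hpref' : s.take ((jN + 1 - 1) * pN) = (List.replicate (jN + 1 - 1) t).flatten := by
        have e1 : (jN + 1 - 1) * pN = (jN - 1) * pN + pN := by
          have : jN - 1 + 1 = jN := by omega
          calc (jN + 1 - 1) * pN = ((jN - 1) + 1) * pN := by rw [show jN + 1 - 1 = (jN - 1) + 1 by omega]
          _ = (jN - 1) * pN + pN := by rw [Nat.succ_mul]
        rw [e1, List.take_add, hpref]
        have e2 : (List.drop ((jN - 1) * pN) s).take pN = t := heq.symm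
        rw [e2]
        rw [show jN + 1 - 1 = (jN - 1) + 1 by omega, List.replicate_succ',
          List.flatten_append]
        simp
      exact ih (jN + 1) (by omega) (by omega) (by omega) hpref'
    · simp only [pvSegLoop]
      rw [if_neg hcond]
      have hstop : jN = kN ∨ t ≠ (s.drop ((jN-1)*pN)).take pN := by
        by_cases hj : jN = kN
        · exact Or.inl hj
        · right
          intro ht'
          exact hcond ⟨by exact_mod_cast Nat.lt_of_le_of_ne hjk hj, ht'⟩
      exact pvSegExit s t pN kN jN hp hk hlen ht hj2 hjk hstop hpref

-- ---- candidate-by-candidate equality between A's per-count and the per-size form ----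
theorem pvBcand_none (s : List Char) (p : Int)
    (h : PySem.Int.mod (PySem.List.len s) p ≠ 0) : pvBcand s p = none := by
  unfold pvBcand; rw [if_neg h]

theorem pvNIW_none (s : List Char) (i : Int)
    (h : PySem.Int.mod (PySem.List.len s) i ≠ 0) : pvNIW s i = none := by
  unfold pvNIW; rw [if_pos h]

theorem pvNIW_eq_bcand (s : List Char) (i : Int) (h2 : 2 ≤ i) (hle : i ≤ PySem.List.len s)
    (hmod : PySem.Int.mod (PySem.List.len s) i = 0) :
    pvNIW s i = pvBcand s (PySem.Int.floordiv (PySem.List.len s) i) := by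
  have h0 : (0:Int) ≤ i := by omega
  obtain ⟨iN, rfl⟩ : ∃ m : Nat, i = (m : Int) := ⟨i.toNat, (Int.toNat_of_nonneg h0).symm⟩
  have hlen' : PySem.List.len s = ((s.length : Nat) : Int) := PySem.List.len_eq s
  rw [hlen'] at hle hmod ⊢
  have hiN2 : 2 ≤ iN := by exact_mod_cast h2
  have hiNle : iN ≤ s.length := by exact_mod_cast hle
  have hdvd : iN ∣ s.length := by
    rw [PySem.Int.mod_natCast] at hmod
    exact Nat.dvd_of_mod_eq_zero (by exact_mod_cast hmod)
  have hfd : PySem.Int.floordiv ((s.length : Nat) : Int) (iN : Int)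
      = ((s.length / iN : Nat) : Int) := PySem.Int.floordiv_natCast _ _
  set pN := s.length / iN with hpN
  have hprod : pN * iN = s.length := Nat.div_mul_cancel hdvd
  have hp1 : 1 ≤ pN := (Nat.one_le_div_iff (by omega)).mpr hiNle
  have hpdvd : pN ∣ s.length := ⟨iN, hprod.symm⟩
  have hpmod : PySem.Int.mod ((s.length : Nat) : Int) (pN : Int) = 0 := by
    rw [PySem.Int.mod_natCast]
    obtain ⟨c, hc⟩ := hpdvd
    simp [hc, Nat.mul_mod_right]
  have hfk : PySem.Int.floordiv ((s.length : Nat) : Int) (pN : Int) = (iN : Int) := by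
    rw [PySem.Int.floordiv_natCast]
    congr 1
    exact Nat.div_div_self hdvd (by omega)
  have hslen : s.length = iN * pN := by rw [← hprod, Nat.mul_comm]
  have hseg := pvSegLoop_spec iN s (s.take pN) pN iN 2 hp1 hiN2 hslen rfl le_rfl hiN2
    (by omega) (by simp)
  have hnp : ¬((pN : Int) < 1) := by omega
  have e1 : (pN : Int) * ((2:Int) - 1) = ((pN : Nat) : Int) := by push_cast; ring
  have e2 : (pN : Int) * (2:Int) = ((pN * 2 : Nat) : Int) := by push_cast; ring
  have e3 : pN * 2 - pN = pN := by omega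
  have e4 : ((2:Nat) : Int) = (2 : Int) := by norm_num
  have e5 : (2 - 1) * pN = pN := by omega
  rw [e4, e5] at hseg
  obtain ⟨hL, hI⟩ := hseg
  simp only [pvNIW, pvBcand, PySem.List.len_eq, hfd, hfk]
  rw [if_neg (not_not_intro hmod), if_neg hnp, if_pos hpmod]
  simp only [PySem.List.slice_to_natCast, e1, e2, PySem.List.slice_natCast, e3,
    Int.toNat_natCast, pvPyRepeat_cast]
  rw [if_congr hI rfl rfl]
  by_cases hq : (List.replicate iN (List.take pN s)).flatten ≤ s
  · rw [if_pos hq, if_pos hq]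
    simp only [hL]
    by_cases hlt : ((PySem.Int.toChars
        ((PySem.Int.ofChars? (List.take pN s)).getD 0 + 1)).length : Int) ≤ (pN : Int)
    · rw [if_neg (by omega), if_pos hlt]
    · rw [if_pos (by omega), if_neg hlt]
  · rw [if_neg hq, if_neg hq]
    have h6 : (List.take pN s).length ≤ pN := by simp [List.length_take]
    rw [if_pos (by exact_mod_cast h6)]

theorem pvMem_iff (s : List Char) (x : Int) : x ∈ pvACands s ↔ x ∈ pvCands s := by
  unfold pvACands pvCands
  simp only [List.mem_filterMap, PySem.List.mem_pyRange_one]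
  constructor
  · rintro ⟨i, ⟨hi2, hilt⟩, hsome⟩
    by_cases hmod : PySem.Int.mod (PySem.List.len s) i = 0
    · have h0 : (0:Int) ≤ i := by omega
      obtain ⟨iN, rfl⟩ : ∃ m : Nat, i = (m : Int) := ⟨i.toNat, (Int.toNat_of_nonneg h0).symm⟩
      have hlen' : PySem.List.len s = ((s.length : Nat) : Int) := PySem.List.len_eq s
      have hi2' : 2 ≤ iN := by exact_mod_cast hi2
      have hile : (iN : Int) ≤ PySem.List.len s := by
        rw [hlen']; rw [hlen'] at hilt; omega
      have hileN : iN ≤ s.length := by rw [hlen'] at hile; exact_mod_cast hile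
      rw [pvNIW_eq_bcand s (iN : Int) hi2 hile hmod] at hsome
      refine ⟨PySem.Int.floordiv (PySem.List.len s) (iN : Int), ⟨?_, ?_⟩, hsome⟩
      · rw [hlen', PySem.Int.floordiv_natCast]
        exact_mod_cast (Nat.one_le_div_iff (by omega)).mpr hileN
      · rw [hlen', PySem.Int.floordiv_natCast]
        exact_mod_cast Nat.div_lt_self (by omega) (by omega)
    · rw [pvNIW_none s i hmod] at hsome; cases hsome
  · rintro ⟨p, ⟨hp1, hplt⟩, hsome⟩
    by_cases hmod : PySem.Int.mod (PySem.List.len s) p = 0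
    · have h0 : (0:Int) ≤ p := by omega
      obtain ⟨pN, rfl⟩ : ∃ m : Nat, p = (m : Int) := ⟨p.toNat, (Int.toNat_of_nonneg h0).symm⟩
      have hlen' : PySem.List.len s = ((s.length : Nat) : Int) := PySem.List.len_eq s
      have hp1' : 1 ≤ pN := by exact_mod_cast hp1
      have hpltN : pN < s.length := by rw [hlen'] at hplt; exact_mod_cast hplt
      have hpdvd : pN ∣ s.length := by
        rw [hlen', PySem.Int.mod_natCast] at hmod
        exact Nat.dvd_of_mod_eq_zero (by exact_mod_cast hmod)
      have hm : pN * (s.length / pN) = s.length := Nat.mul_div_cancel' hpdvd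
      have hi2' : 2 ≤ s.length / pN := by
        by_contra hlt
        have h1 : s.length / pN ≤ 1 := by omega
        have h2 : pN * (s.length / pN) ≤ pN * 1 := Nat.mul_le_mul_left pN h1
        omega
      have hiled : s.length / pN ≤ s.length := Nat.div_le_self _ _
      have hidvd : (s.length / pN) ∣ s.length := Nat.div_dvd_of_dvd hpdvd
      have hz : s.length % (s.length / pN) = 0 := by
        obtain ⟨c, hc⟩ := hidvd
        nth_rewrite 1 [hc]
        exact Nat.mul_mod_right _ _
      have himod : PySem.Int.mod (PySem.List.len s) ((s.length / pN : Nat) : Int) = 0 := by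
        rw [hlen', PySem.Int.mod_natCast]
        exact_mod_cast hz
      have hffd : PySem.Int.floordiv (PySem.List.len s) ((s.length / pN : Nat) : Int)
          = (pN : Int) := by
        rw [hlen', PySem.Int.floordiv_natCast]
        congr 1
        exact Nat.div_div_self hpdvd (by omega)
      refine ⟨((s.length / pN : Nat) : Int), ⟨by exact_mod_cast hi2', ?_⟩, ?_⟩
      · rw [hlen']; omega
      · rw [pvNIW_eq_bcand s ((s.length / pN : Nat) : Int) (by exact_mod_cast hi2')
          (by rw [hlen']; exact_mod_cast hiled) himod, hffd]
        exact hsome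
    · rw [pvBcand_none s p hmod] at hsome; cases hsome

-- ---- folds and min? ----
theorem pvFoldl_filterMap {α : Type} (f : α → Option Int) (l : List α) (acc : List Int) :
    l.foldl (fun acc i => match f i with | some v => acc ++ [v] | none => acc) acc
      = acc ++ l.filterMap f := by
  induction l generalizing acc with
  | nil => simp
  | cons a l ih =>
    simp only [List.foldl_cons, List.filterMap_cons]
    cases h : f a <;> simp [ih]

theorem pvMin?_congr (l₁ l₂ : List Int) (h : ∀ x, x ∈ l₁ ↔ x ∈ l₂) :
    PySem.List.min? l₁ (fun x => x) = PySem.List.min? l₂ (fun x => x) := by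
  cases h1 : PySem.List.min? l₁ (fun x => x) with
  | none =>
    have e1 : l₁ = [] := (PySem.List.min?_eq_none_iff _ _).mp h1
    have e2 : l₂ = [] := by
      subst e1
      rcases l₂ with _ | ⟨y, t⟩
      · rfl
      · exact absurd ((h y).mpr (by simp)) (by simp)
    rw [e2]
    exact ((PySem.List.min?_eq_none_iff ([] : List Int) _).mpr rfl).symm
  | some m =>
    have hm1 : m ∈ l₁ := PySem.List.min?_mem h1
    have hm2 : m ∈ l₂ := (h m).mp hm1
    cases h2 : PySem.List.min? l₂ (fun x => x) with
    | none =>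
      have e2 : l₂ = [] := (PySem.List.min?_eq_none_iff _ _).mp h2
      rw [e2] at hm2; cases hm2
    | some m' =>
      have hm2' : m' ∈ l₁ := (h m').mpr (PySem.List.min?_mem h2)
      have a1 := PySem.List.min?_isMin h1 m' hm2'
      have a2 := PySem.List.min?_isMin h2 m hm2
      exact congrArg some (le_antisymm a1 a2)

-- ---- one round of A ----
theorem pvA_round (fuel : Nat) (n : Int) :
    pvAux (fuel+1) n =
      if pvCands (PySem.Int.toChars n) = [] then
        pvAux fuel ((PySem.Int.ofChars? (['1'] ++ PySem.List.pyRepeat ['0']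
          (PySem.List.len (PySem.Int.toChars n)))).getD 0)
      else (PySem.List.min? (pvCands (PySem.Int.toChars n)) (fun x => x)).getD 0 := by
  simp only [pvAux]
  rw [pvFoldl_filterMap (pvNextInvalidWith n)
    (PySem.List.pyRange 2 (PySem.List.len (PySem.Int.toChars n) + 1) 1) []]
  rw [List.nil_append]
  have hAC : List.filterMap (pvNextInvalidWith n)
      (PySem.List.pyRange 2 (PySem.List.len (PySem.Int.toChars n) + 1) 1)
      = pvACands (PySem.Int.toChars n) := rfl
  rw [hAC]
  by_cases hC : pvCands (PySem.Int.toChars n) = []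
  · have hA : pvACands (PySem.Int.toChars n) = [] := by
      rw [List.eq_nil_iff_forall_not_mem] at hC ⊢
      intro x hx
      exact hC x ((pvMem_iff _ x).mp hx)
    rw [hA, if_pos hC, if_pos (by simp [PySem.List.len_eq])]
  · have hA : pvACands (PySem.Int.toChars n) ≠ [] := by
      intro hnil
      apply hC
      rw [List.eq_nil_iff_forall_not_mem] at hnil ⊢
      intro x hx
      exact hnil x ((pvMem_iff _ x).mpr hx)
    have hAlen : ¬(PySem.List.len (pvACands (PySem.Int.toChars n)) = 0) := by
      rw [PySem.List.len_eq]
      simpa [List.length_eq_zero_iff] using hA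
    rw [if_neg hC, if_neg hAlen, pvMin?_congr _ _ (pvMem_iff _)]

-- ---------------------------------------------------------------------------
-- 5. the per-segment-size candidate is the least periodic number above n
-- ---------------------------------------------------------------------------

def pvGoodP (N p m : Nat) : Prop := N < m ∧ (pvD m).length = (pvD N).length ∧ pvPerP p m

-- comparisons between a string and a repeated block, decided by the leading block
theorem pvRep_lt_right (u s : List Char) (k : Nat) (hk : 0 < k)
    (hslen : s.length = k * u.length) (hne : u ≠ s.take u.length) :
    s < pvRep u k ↔ s.take u.length < u := by
  have htl : (s.take u.length).length = u.length := by
    rw [List.length_take]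
    have : u.length ≤ k * u.length := Nat.le_mul_of_pos_left _ hk
    omega
  conv_lhs => rw [show k = (k - 1) + 1 by omega]
  rw [pvRep_succ]
  conv_lhs => rw [show s = s.take u.length ++ s.drop u.length from (List.take_append_drop _ s).symm]
  rw [pvListLtIff, pvListLtIff]
  exact pvLexAppendNe (s.take u.length) u _ _ htl (fun h => hne h.symm)

theorem pvRep_le_rep (x y : List Char) (k : Nat) (hk : 0 < k)
    (hlen : x.length = y.length) (hle : x ≤ y) : pvRep x k ≤ pvRep y k := by
  by_cases hxy : x = y
  · rw [hxy]
  · conv_lhs => rw [show k = (k - 1) + 1 by omega]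
    conv_rhs => rw [show k = (k - 1) + 1 by omega]
    rw [pvRep_succ, pvRep_succ]
    exact (pvLeAppendNe x y _ _ hlen hxy).mpr hle

theorem pvBcand_spec (N pN : Nat) (hp : 0 < pN) (hlt : pN < (pvD N).length) :
    (∀ c, pvBcand (pvD N) (pN : Int) = some c →
      0 ≤ c ∧ pvGoodP N pN c.toNat ∧ ∀ m, pvGoodP N pN m → c.toNat ≤ m) ∧
    (pvBcand (pvD N) (pN : Int) = none → ∀ m, ¬ pvGoodP N pN m) := by
  by_cases hdvd : pN ∣ (pvD N).length
  case neg =>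
    -- segment size does not divide the digit count: no candidate and no periodic number
    have hmodnz : PySem.Int.mod (PySem.List.len (pvD N)) (pN : Int) ≠ 0 := by
      rw [PySem.List.len_eq, PySem.Int.mod_natCast]
      intro h
      exact hdvd (Nat.dvd_of_mod_eq_zero (by exact_mod_cast h))
    have hnone := pvBcand_none (pvD N) (pN : Int) hmodnz
    constructor
    · intro c hc
      rw [hnone] at hc
      cases hc
    · intro _ m hm
      obtain ⟨_, hmlen, _, _, hmod, _⟩ := hm
      rw [hmlen] at hmod
      exact hdvd (Nat.dvd_of_mod_eq_zero hmod)
  case pos =>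
  have hN0 : N ≠ 0 := by
    intro h
    subst h
    rw [pvD_zero] at hlt
    simp at hlt
    omega
  -- notation
  set s := pvD N with hs
  set d := s.length with hd
  set kN := d / pN with hkN
  set t := s.take pN with ht
  set B := pvValD t with hB
  clear_value s d kN t B
  have hcanon : pvCanon s := by rw [hs]; exact pvD_canon N
  have hdig : pvAllDig s := hcanon.2.1
  have hsval : pvValD s = N := by rw [hs]; exact pvValD_D N
  have hdk : d = kN * pN := by
    rw [hkN, Nat.div_mul_cancel hdvd]
  have hk2 : 2 ≤ kN := by
    rcases Nat.lt_or_ge kN 2 with hcon | hge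
    · exfalso
      have h01 : kN = 0 ∨ kN = 1 := by omega
      rcases h01 with h' | h' <;> rw [h'] at hdk <;> omega
    · exact hge
  have htlen : t.length = pN := by
    rw [ht, List.length_take]
    omega
  have htdig : pvAllDig t := by
    intro c hc
    rw [ht] at hc
    exact hdig c (List.mem_of_mem_take hc)
  have htne : t ≠ [] := by
    rw [← List.length_pos_iff, htlen]
    omega
  have hshead : s.head? ≠ some '0' := by
    intro h
    have he := hcanon.2.2 h
    rw [he] at hd
    simp at hd
    omega
  have hthead : t.head? = s.head? := by
    rw [ht]
    cases s with
    | nil => simp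
    | cons a l =>
      obtain ⟨p', rfl⟩ : ∃ p', pN = p' + 1 := ⟨pN - 1, by omega⟩
      rfl
  have htcanon : pvCanon t := by
    refine ⟨htne, htdig, ?_⟩
    intro hh
    rw [hthead] at hh
    exact absurd hh hshead
  have hBlow : 10 ^ (pN - 1) ≤ B := by
    obtain ⟨c, w, hcw⟩ := List.exists_cons_of_ne_nil htne
    have hc0 : c ≠ '0' := by
      intro h
      apply hshead
      rw [← hthead, hcw, h]
      rfl
    have hge := pvValD_ge c w (by rw [← hcw]; exact htdig) hc0
    rw [← hcw] at hge
    have hw : w.length = pN - 1 := by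
      have := congrArg List.length hcw
      simp [htlen] at this
      omega
    rw [hB, ← hw]
    exact hge
  have hBhigh : B < 10 ^ pN := by
    have := pvValD_lt t htdig
    rw [htlen] at this
    rw [hB]
    exact this
  have hparse : PySem.Int.ofChars? t = some ((B : Nat) : Int) := by
    rw [hB]
    exact pvParseDigits t htne htdig
  have hmodn : d % pN = 0 := by
    rcases hdvd with ⟨c, hc⟩
    rw [hc]
    simp [Nat.mul_mod_right]
  have hmodz : PySem.Int.mod (PySem.List.len s) (pN : Int) = 0 := by
    rw [PySem.List.len_eq, PySem.Int.mod_natCast, ← hd, hmodn]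
    rfl
  have hfdiv : PySem.Int.floordiv (PySem.List.len s) (pN : Int) = ((kN : Nat) : Int) := by
    rw [PySem.List.len_eq, PySem.Int.floordiv_natCast, ← hd, ← hkN]
  have hEq : pvBcand s (pN : Int) =
      (let t' := if pvRep t kN ≤ s then pvD (B + 1) else t
       if t'.length ≤ pN then some ((pvValD (pvRep t' kN) : Nat) : Int) else none) := by
    unfold pvBcand
    rw [if_pos hmodz, hfdiv]
    simp only [PySem.List.slice_to_natCast, pvPyRepeat_cast, ← ht]
    rw [hparse]
    simp only [Option.getD_some]
    rw [show ((B : Nat) : Int) + 1 = (((B + 1 : Nat)) : Int) by push_cast; ring,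
      pvToChars_nonneg _ (by positivity), Int.toNat_natCast]
    by_cases hcmp : (List.replicate kN t).flatten ≤ s
    · rw [if_pos hcmp, if_pos (show pvRep t kN ≤ s from hcmp)]
      by_cases hlen' : (pvD (B + 1)).length ≤ pN
      · rw [if_pos (by rw [PySem.List.len_eq]; exact_mod_cast hlen'), if_pos hlen']
        rw [show (List.replicate kN (pvD (B + 1))).flatten = pvRep (pvD (B + 1)) kN from rfl]
        rw [pvParseDigits _ (pvRep_ne_nil _ _ (by omega)
            (by rw [← List.length_pos_iff]; have := pvD_len_pos (B + 1); omega))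
          (pvRep_allDig _ _ (pvD_canon (B + 1)).2.1)]
        rfl
      · rw [if_neg (by rw [PySem.List.len_eq]; intro hcon; exact hlen' (by exact_mod_cast hcon)),
          if_neg hlen']
    · rw [if_neg hcmp, if_neg (show ¬ pvRep t kN ≤ s from hcmp),
        if_pos (by rw [PySem.List.len_eq]; exact_mod_cast le_of_eq htlen),
        if_pos (le_of_eq htlen)]
      rw [show (List.replicate kN t).flatten = pvRep t kN from rfl]
      rw [pvParseDigits _ (pvRep_ne_nil _ _ (by omega) htne) (pvRep_allDig _ _ htdig)]
      rfl
  -- facts shared by the value branches: for a block u of length pN with nonzero head,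
  -- the number pvValD (pvRep u kN) is pN-periodic with d digits
  have hrepfacts : ∀ u : List Char, u.length = pN → pvAllDig u → u.head? ≠ some '0' →
      (pvD (pvValD (pvRep u kN)) = pvRep u kN) ∧ (pvRep u kN).length = d ∧
        pvPerP pN (pvValD (pvRep u kN)) := by
    intro u hulen hudig huhead
    have hune : u ≠ [] := by rw [← List.length_pos_iff]; omega
    have hrlen : (pvRep u kN).length = d := by
      rw [pvRep_length, hulen, hdk]
    have hrcanon : pvCanon (pvRep u kN) := by
      refine ⟨pvRep_ne_nil _ _ (by omega) hune, pvRep_allDig _ _ hudig, ?_⟩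
      intro hh
      rw [pvRep_head? _ _ (by omega) hune] at hh
      exact absurd hh huhead
    have hDr : pvD (pvValD (pvRep u kN)) = pvRep u kN := pvD_valD _ hrcanon
    refine ⟨hDr, hrlen, hp, ?_, ?_, ?_⟩
    · rw [hDr, hrlen]; omega
    · rw [hDr, hrlen, hdk, Nat.mul_mod_left]
    · rw [hDr, hrlen, ← hkN]
      have htk : (pvRep u kN).take pN = u := by
        rw [← hulen, pvRep_take _ _ (by omega)]
      rw [htk]
  -- every pN-periodic m with d digits is its own leading block repeated kN times
  have hblock : ∀ m : Nat, (pvD m).length = d → pvPerP pN m →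
      pvD m = pvRep ((pvD m).take pN) kN ∧ ((pvD m).take pN).length = pN ∧
        pvAllDig ((pvD m).take pN) := by
    intro m hmlen hper
    obtain ⟨_, _, _, hmeq⟩ := hper
    rw [hmlen, ← hkN] at hmeq
    refine ⟨hmeq, ?_, fun c hc => (pvD_canon m).2.1 c (List.mem_of_mem_take hc)⟩
    rw [List.length_take, hmlen]
    omega
  -- m > N (same length) means pvD m is lexicographically above s
  have habove : ∀ m : Nat, N < m → (pvD m).length = d → s < pvD m := by
    intro m hNm hmlen
    refine (pvLex_lt_iff s (pvD m) hdig (pvD_canon m).2.1 (by rw [hmlen, ← hd])).mpr ?_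
    rw [hsval, pvValD_D]
    exact hNm
  by_cases hcmp : pvRep t kN ≤ s
  case pos =>
    -- the block is incremented before repetition
    have ht'head : (pvD (B + 1)).head? ≠ some '0' := by
      intro hh
      have he := (pvD_canon (B + 1)).2.2 hh
      have hv := pvValD_D (B + 1)
      rw [he, show pvValD ['0'] = 0 from rfl] at hv
      omega
    have ht'dig := (pvD_canon (B + 1)).2.1
    have ht'val : pvValD (pvD (B + 1)) = B + 1 := pvValD_D _
    have htne' : t ≠ pvD (B + 1) := by
      intro he
      have := congrArg pvValD he
      rw [ht'val, ← hB] at this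
      omega
    by_cases hov : B + 1 < 10 ^ pN
    case pos =>
      have ht'len : (pvD (B + 1)).length = pN :=
        pvPow_len_eq _ _ (B + 1) (pvD_len_pos _) hp (pvD_pow_le _ (by omega))
          (pvD_lt_pow _) (le_trans hBlow (by omega)) hov
      obtain ⟨hDC, hClen, hCper⟩ := hrepfacts (pvD (B + 1)) ht'len ht'dig ht'head
      set C := pvValD (pvRep (pvD (B + 1)) kN) with hC
      have hEq2 : pvBcand s (pN : Int) = some ((C : Nat) : Int) := by
        rw [hEq]
        simp only []
        rw [if_pos hcmp, if_pos (le_of_eq ht'len)]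
      have hslt : s < pvRep (pvD (B + 1)) kN := by
        refine (pvRep_lt_right (pvD (B + 1)) s kN (by omega)
          (by rw [ht'len, ← hdk, hd]) ?_).mpr ?_
        · rw [ht'len, ← ht]
          exact fun h => htne' h.symm
        · rw [ht'len, ← ht]
          refine (pvLex_lt_iff t (pvD (B + 1)) htdig ht'dig (by rw [htlen, ht'len])).mpr ?_
          rw [ht'val, ← hB]
          omega
      have hNC : N < C := by
        have := (pvLex_lt_iff s (pvRep (pvD (B + 1)) kN) hdig
          (pvRep_allDig _ _ ht'dig) (by rw [hClen, hd])).mp hslt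
        rw [hsval, ← hC] at this
        exact this
      have hmin : ∀ m, pvGoodP N pN m → C ≤ m := by
        rintro m ⟨hNm, hmlen, hper⟩
        rw [← hs, ← hd] at hmlen
        obtain ⟨hmeq, hulen, hudig⟩ := hblock m hmlen hper
        have hsm := habove m hNm hmlen
        have hut : (pvD m).take pN ≠ t := by
          intro he
          rw [hmeq, he] at hsm
          exact absurd hcmp (not_le.mpr hsm)
        have htu : t < (pvD m).take pN := by
          rw [hmeq] at hsm
          have := (pvRep_lt_right ((pvD m).take pN) s kN (by omega)
            (by rw [hulen, ← hdk, hd]) (by rw [hulen, ← ht]; exact hut)).mp hsm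
          rw [hulen, ← ht] at this
          exact this
        have hBu : B < pvValD ((pvD m).take pN) := by
          have := (pvLex_lt_iff t _ htdig hudig (by rw [htlen, hulen])).mp htu
          rw [← hB] at this
          exact this
        have ht'u : pvD (B + 1) ≤ (pvD m).take pN := by
          refine (pvLex_le_iff _ _ ht'dig hudig (by rw [ht'len, hulen])).mpr ?_
          rw [ht'val]
          omega
        have hreprep : pvRep (pvD (B + 1)) kN ≤ pvRep ((pvD m).take pN) kN :=
          pvRep_le_rep _ _ kN (by omega) (by rw [ht'len, hulen]) ht'u
        rw [← hmeq] at hreprep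
        have := (pvLex_le_iff (pvRep (pvD (B + 1)) kN) (pvD m)
          (pvRep_allDig _ _ ht'dig) (pvD_canon m).2.1 (by rw [hClen, hmlen])).mp hreprep
        rw [← hC, pvValD_D] at this
        exact this
      constructor
      · intro c hc
        rw [hEq2] at hc
        injection hc with hc
        subst hc
        refine ⟨by positivity, ?_, ?_⟩
        · rw [Int.toNat_natCast]
          refine ⟨hNC, ?_, hCper⟩
          rw [hDC, hClen, hd, hs]
        · intro m hm
          rw [Int.toNat_natCast]
          exact hmin m hm
      · intro hnone
        rw [hEq2] at hnone
        cases hnone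
    case neg =>
      -- incrementing the all-9s block overflows: no candidate and no periodic number
      have hEq2 : pvBcand s (pN : Int) = none := by
        rw [hEq]
        simp only []
        rw [if_pos hcmp, if_neg]
        intro hle'
        have h1 := pvD_lt_pow (B + 1)
        have h2 : (10:Nat) ^ (pvD (B + 1)).length ≤ 10 ^ pN :=
          Nat.pow_le_pow_right (by norm_num) hle'
        omega
      constructor
      · intro c hc
        rw [hEq2] at hc
        cases hc
      · rintro _ m ⟨hNm, hmlen, hper⟩
        rw [← hs, ← hd] at hmlen
        obtain ⟨hmeq, hulen, hudig⟩ := hblock m hmlen hper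
        have hsm := habove m hNm hmlen
        have hut : (pvD m).take pN ≠ t := by
          intro he
          rw [hmeq, he] at hsm
          exact absurd hcmp (not_le.mpr hsm)
        have htu : t < (pvD m).take pN := by
          rw [hmeq] at hsm
          have := (pvRep_lt_right ((pvD m).take pN) s kN (by omega)
            (by rw [hulen, ← hdk, hd]) (by rw [hulen, ← ht]; exact hut)).mp hsm
          rw [hulen, ← ht] at this
          exact this
        have hBu : B < pvValD ((pvD m).take pN) := by
          have := (pvLex_lt_iff t _ htdig hudig (by rw [htlen, hulen])).mp htu
          rw [← hB] at this
          exact this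
        have hul : pvValD ((pvD m).take pN) < 10 ^ pN := by
          have := pvValD_lt _ hudig
          rw [hulen] at this
          exact this
        omega
  case neg =>
    -- the leading block already repeats to something above s
    obtain ⟨hDC, hClen, hCper⟩ := hrepfacts t htlen htdig (by rw [hthead]; exact hshead)
    set C := pvValD (pvRep t kN) with hC
    have hEq2 : pvBcand s (pN : Int) = some ((C : Nat) : Int) := by
      rw [hEq]
      simp only []
      rw [if_neg hcmp, if_pos (le_of_eq htlen)]
    have hslt : s < pvRep t kN := lt_of_not_ge hcmp
    have hNC : N < C := by
      have := (pvLex_lt_iff s (pvRep t kN) hdig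
        (pvRep_allDig _ _ htdig) (by rw [hClen, hd])).mp hslt
      rw [hsval, ← hC] at this
      exact this
    have hmin : ∀ m, pvGoodP N pN m → C ≤ m := by
      rintro m ⟨hNm, hmlen, hper⟩
      rw [← hs, ← hd] at hmlen
      obtain ⟨hmeq, hulen, hudig⟩ := hblock m hmlen hper
      have hsm := habove m hNm hmlen
      by_cases hut : (pvD m).take pN = t
      · have hmC : m = C := by
          have hv := pvValD_D m
          rw [hmeq, hut, ← hC] at hv
          omega
        omega
      · have htu : t ≤ (pvD m).take pN := by
          rw [hmeq] at hsm
          have := (pvRep_lt_right ((pvD m).take pN) s kN (by omega)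
            (by rw [hulen, ← hdk, hd]) (by rw [hulen, ← ht]; exact hut)).mp hsm
          rw [hulen, ← ht] at this
          exact le_of_lt this
        have hreprep : pvRep t kN ≤ pvRep ((pvD m).take pN) kN :=
          pvRep_le_rep _ _ kN (by omega) (by rw [htlen, hulen]) htu
        rw [← hmeq] at hreprep
        have := (pvLex_le_iff (pvRep t kN) (pvD m)
          (pvRep_allDig _ _ htdig) (pvD_canon m).2.1 (by rw [hClen, hmlen])).mp hreprep
        rw [← hC, pvValD_D] at this
        exact this
    constructor
    · intro c hc
      rw [hEq2] at hc
      injection hc with hc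
      subst hc
      refine ⟨by positivity, ?_, ?_⟩
      · rw [Int.toNat_natCast]
        refine ⟨hNC, ?_, hCper⟩
        rw [hDC, hClen, hd, hs]
      · intro m hm
        rw [Int.toNat_natCast]
        exact hmin m hm
    · intro hnone
      rw [hEq2] at hnone
      cases hnone

-- ---------------------------------------------------------------------------
-- 6. assembling A: pvAux returns the least repeated number above n
-- ---------------------------------------------------------------------------

def pvGood (N m : Nat) : Prop := N < m ∧ (pvD m).length = (pvD N).length ∧ pvRepN m

def pvLeast (N r : Nat) : Prop := N < r ∧ pvRepN r ∧ ∀ m, N < m → pvRepN m → r ≤ m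

theorem pvCands_elem (N : Nat) : ∀ c ∈ pvCands (pvD N), 0 ≤ c ∧ pvGood N c.toNat := by
  intro c hc
  unfold pvCands at hc
  rw [List.mem_filterMap] at hc
  obtain ⟨p, hpmem, hsome⟩ := hc
  rw [PySem.List.mem_pyRange_one, PySem.List.len_eq] at hpmem
  have h0 : (0:Int) ≤ p := by omega
  obtain ⟨pN, rfl⟩ : ∃ m : Nat, p = (m : Int) := ⟨p.toNat, (Int.toNat_of_nonneg h0).symm⟩
  have hp : 0 < pN := by exact_mod_cast hpmem.1
  have hlt : pN < (pvD N).length := by exact_mod_cast hpmem.2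
  obtain ⟨hge, hgood, _⟩ := (pvBcand_spec N pN hp hlt).1 c hsome
  exact ⟨hge, hgood.1, hgood.2.1, ⟨pN, hgood.2.2⟩⟩

theorem pvCands_cover (N m : Nat) (h : pvGood N m) :
    ∃ c ∈ pvCands (pvD N), c.toNat ≤ m := by
  obtain ⟨hNm, hlen, p, hper⟩ := h
  have hp0 : 0 < p := hper.1
  have hplt : p < (pvD N).length := by
    have := hper.2.1
    omega
  cases hbc : pvBcand (pvD N) (p : Int) with
  | none =>
    exact absurd ⟨hNm, hlen, hper⟩ ((pvBcand_spec N p hp0 hplt).2 hbc m)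
  | some c =>
    obtain ⟨_, _, hmin⟩ := (pvBcand_spec N p hp0 hplt).1 c hbc
    refine ⟨c, ?_, hmin m ⟨hNm, hlen, hper⟩⟩
    unfold pvCands
    rw [List.mem_filterMap]
    refine ⟨(p : Int), ?_, hbc⟩
    rw [PySem.List.mem_pyRange_one, PySem.List.len_eq]
    constructor <;> [exact_mod_cast hp0; exact_mod_cast hplt]

theorem pvD_tenpow (d : Nat) : pvD (10 ^ d) = '1' :: List.replicate d '0' := by
  have hcanon : pvCanon ('1' :: List.replicate d '0') := by
    refine ⟨by simp, ?_, by intro hh; simp at hh⟩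
    intro c hc
    simp only [List.mem_cons, List.mem_replicate] at hc
    rcases hc with rfl | ⟨_, rfl⟩ <;> rfl
  have hval : pvValD ('1' :: List.replicate d '0') = 10 ^ d := by
    rw [pvValD_cons, pvValD_replicate_zero, List.length_replicate,
      show '1'.toNat - 48 = 1 from rfl]
    ring
  rw [← hval, pvD_valD _ hcanon]

theorem pvTenPow_not_rep (d : Nat) (hd : 1 ≤ d) : ¬ pvRepN (10 ^ d) := by
  have hD : pvD (10 ^ d) = '1' :: List.replicate d '0' := pvD_tenpow d
  rintro ⟨p, hp0, hplt, hmod, heq⟩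
  rw [hD] at hplt hmod heq
  simp only [List.length_cons, List.length_replicate] at hplt hmod heq
  set s := '1' :: List.replicate d '0' with hs
  set t := s.take p with ht
  set k := (d + 1) / p with hk
  have hdvd : p ∣ d + 1 := Nat.dvd_of_mod_eq_zero hmod
  have hk2 : 2 ≤ k := by
    have hkp := Nat.div_mul_cancel hdvd
    have h0 : (d + 1) / p ≠ 0 := by intro h0; rw [h0] at hkp; omega
    have h1 : (d + 1) / p ≠ 1 := by intro h1; rw [h1] at hkp; omega
    rw [hk]
    generalize (d + 1) / p = q at h0 h1
    omega
  have htlen : t.length = p := by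
    rw [ht]
    simp only [hs, List.length_take, List.length_cons, List.length_replicate]
    omega
  have hdropeq : s.drop p = pvRep t (k - 1) := by
    have h1 : pvRep t k = t ++ pvRep t (k - 1) := by
      conv_lhs => rw [show k = (k - 1) + 1 by omega]
      rw [pvRep_succ]
    rw [heq, h1, ← htlen, List.drop_left]
  have hhead1 : (pvRep t (k - 1)).head? = some '1' := by
    rw [pvRep_head? t (k - 1) (by omega) (by rw [← List.length_pos_iff, htlen]; omega)]
    rw [ht, hs]
    obtain ⟨p', rfl⟩ : ∃ p', p = p' + 1 := ⟨p - 1, by omega⟩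
    rfl
  have hhead0 : (s.drop p).head? = some '0' := by
    rw [hs]
    obtain ⟨p', rfl⟩ : ∃ p', p = p' + 1 := ⟨p - 1, by omega⟩
    rw [List.drop_succ_cons, List.drop_replicate]
    have : d - p' ≠ 0 := by omega
    obtain ⟨q, hq⟩ : ∃ q, d - p' = q + 1 := ⟨d - p' - 1, by omega⟩
    rw [hq, List.replicate_succ]
    rfl
  rw [hdropeq, hhead1] at hhead0
  cases hhead0

theorem pvRepunit (e : Nat) (he : 2 ≤ e) :
    pvRepN (pvValD (List.replicate e '1')) ∧
    (pvD (pvValD (List.replicate e '1')) = List.replicate e '1') := by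
  have hcanon : pvCanon (List.replicate e '1') := by
    refine ⟨by rw [← List.length_pos_iff, List.length_replicate]; omega, ?_, ?_⟩
    · intro c hc
      simp only [List.mem_replicate] at hc
      rw [hc.2]; rfl
    · intro hh
      obtain ⟨e', rfl⟩ : ∃ e', e = e' + 1 := ⟨e - 1, by omega⟩
      rw [List.replicate_succ] at hh
      simp at hh
  have hD : pvD (pvValD (List.replicate e '1')) = List.replicate e '1' := pvD_valD _ hcanon
  refine ⟨⟨1, ?_, ?_, ?_, ?_⟩, hD⟩
  · norm_num
  · rw [hD, List.length_replicate]; omega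
  · omega
  · rw [hD, List.length_replicate, Nat.div_one]
    have htake : (List.replicate e '1').take 1 = ['1'] := by
      rw [List.take_replicate]
      have : min 1 e = 1 := by omega
      rw [this]
      rfl
    rw [htake, pvRep_singleton]

theorem pvRound_nonempty (N : Nat) (hne : pvCands (pvD N) ≠ []) :
    ∃ c0, PySem.List.min? (pvCands (pvD N)) (fun x => x) = some c0 ∧ 0 ≤ c0 ∧
      pvLeast N c0.toNat ∧ (pvD c0.toNat).length = (pvD N).length := by
  cases hm : PySem.List.min? (pvCands (pvD N)) (fun x => x) with
  | none => exact absurd ((PySem.List.min?_eq_none_iff _ _).mp hm) hne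
  | some c0 =>
    have hmem := PySem.List.min?_mem hm
    have hel := pvCands_elem N c0 hmem
    have h0 := hel.1
    have hNc := hel.2.1
    have hlenc := hel.2.2.1
    have hrepc := hel.2.2.2
    refine ⟨c0, rfl, h0, ⟨hNc, hrepc, ?_⟩, hlenc⟩
    intro m hNm hrepm
    have hm0 : m ≠ 0 := by omega
    rcases lt_trichotomy (pvD m).length (pvD N).length with hl | hl | hl
    · have := pvLt_of_len_lt m N hl
      omega
    · obtain ⟨c, hcmem, hcm⟩ := pvCands_cover N m ⟨hNm, hl, hrepm⟩
      have hle := PySem.List.min?_isMin hm c hcmem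
      have hc0' := (pvCands_elem N c hcmem).1
      have : c0.toNat ≤ c.toNat := by omega
      omega
    · have h1 : c0.toNat < 10 ^ (pvD N).length := by
        have := pvD_lt_pow c0.toNat
        rw [hlenc] at this
        exact this
      have h2 : 10 ^ (pvD N).length ≤ 10 ^ ((pvD m).length - 1) :=
        Nat.pow_le_pow_right (by norm_num) (by omega)
      have h3 := pvD_pow_le m hm0
      omega

theorem pvRound_empty (N : Nat) (he : pvCands (pvD N) = []) :
    ∀ m, N < m → m ≤ 10 ^ (pvD N).length → ¬ pvRepN m := by
  intro m hNm hup hrep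
  rcases Nat.eq_or_lt_of_le hup with heq | hlt
  · rw [heq] at hrep
    exact pvTenPow_not_rep _ (pvD_len_pos N) hrep
  · have hlen : (pvD m).length = (pvD N).length := by
      have h1 : (pvD m).length ≤ (pvD N).length :=
        pvD_len_le m _ (pvD_len_pos N) hlt
      have h2 : (pvD N).length ≤ (pvD m).length := pvD_len_mono N m (by omega)
      omega
    obtain ⟨c, hcmem, _⟩ := pvCands_cover N m ⟨hNm, hlen, hrep⟩
    rw [he] at hcmem
    cases hcmem

theorem pvTen_parse (dN : Nat) :
    (PySem.Int.ofChars? (['1'] ++ PySem.List.pyRepeat ['0'] ((dN : Nat) : Int))).getD 0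
      = ((10 ^ dN : Nat) : Int) := by
  have hrep : PySem.List.pyRepeat ['0'] ((dN : Nat) : Int) = List.replicate dN '0' := by
    rw [pvPyRepeat_cast]
    exact pvRep_singleton '0' dN
  rw [hrep, show ['1'] ++ List.replicate dN '0' = '1' :: List.replicate dN '0' from rfl]
  rw [pvParseDigits _ (by simp) ?hdig]
  case hdig =>
    intro c hc
    simp only [List.mem_cons, List.mem_replicate] at hc
    rcases hc with rfl | ⟨_, rfl⟩ <;> rfl
  rw [pvValD_cons, pvValD_replicate_zero, List.length_replicate,
    show '1'.toNat - 48 = 1 from rfl]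
  simp

theorem pvA_least (N : Nat) (hN : N ≤ 2147483648) :
    0 ≤ pvAux 64 (N : Int) ∧ pvLeast N (pvAux 64 (N : Int)).toNat ∧
      (pvAux 64 (N : Int)).toNat < 100000000000 := by
  have hpow10 : (10:Nat) ^ 10 = 10000000000 := by norm_num
  have hpow11 : (10:Nat) ^ 11 = 100000000000 := by norm_num
  have hd10 : (pvD N).length ≤ 10 := by
    refine pvD_len_le N 10 (by norm_num) ?_
    omega
  rw [show (64:Nat) = 63 + 1 from rfl, pvA_round,
    pvToChars_nonneg (N : Int) (by positivity), Int.toNat_natCast]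
  by_cases hc : pvCands (pvD N) = []
  · rw [if_pos hc, PySem.List.len_eq, pvTen_parse ((pvD N).length)]
    set dN := (pvD N).length with hdN
    have hd1 : 1 ≤ dN := pvD_len_pos N
    rw [show (63:Nat) = 62 + 1 from rfl, pvA_round,
      pvToChars_nonneg _ (by positivity), Int.toNat_natCast]
    have hMlen : (pvD (10 ^ dN)).length = dN + 1 := by
      refine pvPow_len_eq _ _ (10 ^ dN) (pvD_len_pos _) (by omega)
        (pvD_pow_le _ (by positivity)) (pvD_lt_pow _) (by simp) ?_
      rw [pow_succ]
      have : (0:Nat) < 10 ^ dN := by positivity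
      omega
    -- the repunit with dN+1 digits witnesses a candidate for the second round
    obtain ⟨hRrep, hRD⟩ := pvRepunit (dN + 1) (by omega)
    set R := pvValD (List.replicate (dN + 1) '1') with hR
    have hRlen : (pvD R).length = dN + 1 := by rw [hRD]; simp
    have hRlow : 10 ^ dN + 1 ≤ R := by
      have hcons : List.replicate (dN + 1) '1' = '1' :: List.replicate dN '1' :=
        List.replicate_succ
      have hdig1 : pvAllDig ('1' :: List.replicate dN '1') := by
        intro c hc
        simp only [List.mem_cons, List.mem_replicate] at hc
        rcases hc with rfl | ⟨_, rfl⟩ <;> rfl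
      have h1 : R = 1 * 10 ^ dN + pvValD (List.replicate dN '1') := by
        rw [hR, hcons, pvValD_cons, List.length_replicate,
          show '1'.toNat - 48 = 1 from rfl]
      have h2 : 1 ≤ pvValD (List.replicate dN '1') := by
        obtain ⟨d', hd'⟩ : ∃ d', dN = d' + 1 := ⟨dN - 1, by omega⟩
        rw [hd', List.replicate_succ]
        have := pvValD_ge '1' (List.replicate d' '1')
          (by intro c hc; simp only [List.mem_cons, List.mem_replicate] at hc
              rcases hc with rfl | ⟨_, rfl⟩ <;> rfl) (by decide)
        have hpos : (0:Nat) < 10 ^ (List.replicate d' '1').length := by positivity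
        omega
      omega
    have hgoodR : pvGood (10 ^ dN) R := by
      refine ⟨by omega, by rw [hRlen, hMlen], hRrep⟩
    have hne2 : pvCands (pvD (10 ^ dN)) ≠ [] := by
      obtain ⟨c, hcmem, _⟩ := pvCands_cover (10 ^ dN) R hgoodR
      intro hnil
      rw [hnil] at hcmem
      cases hcmem
    rw [if_neg hne2]
    obtain ⟨c0, hmin?, h0, hleast2, hlen0⟩ := pvRound_nonempty (10 ^ dN) hne2
    rw [hmin?]
    simp only [Option.getD_some]
    have hNM : N < 10 ^ dN := by
      have := pvD_lt_pow N
      rw [← hdN] at this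
      exact this
    have hMc := hleast2.1
    refine ⟨h0, ⟨by omega, hleast2.2.1, ?_⟩, ?_⟩
    · intro m hNm hrepm
      rcases Nat.lt_or_ge (10 ^ dN) m with hgt | hle
      · exact hleast2.2.2 m hgt hrepm
      · exact absurd hrepm (pvRound_empty N hc m hNm (by rw [← hdN]; omega))
    · have h1 : c0.toNat < 10 ^ (dN + 1) := by
        have := pvD_lt_pow c0.toNat
        rw [hlen0, hMlen] at this
        exact this
      have h2 : (10:Nat) ^ (dN + 1) ≤ 10 ^ 11 :=
        Nat.pow_le_pow_right (by norm_num) (by omega)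
      omega
  · rw [if_neg hc]
    obtain ⟨c0, hmin?, h0, hleast, hlen0⟩ := pvRound_nonempty N hc
    rw [hmin?]
    simp only [Option.getD_some]
    refine ⟨h0, hleast, ?_⟩
    have h1 : c0.toNat < 10 ^ (pvD N).length := by
      have := pvD_lt_pow c0.toNat
      rw [hlen0] at this
      exact this
    have h2 : (10:Nat) ^ (pvD N).length ≤ 10 ^ 10 :=
      Nat.pow_le_pow_right (by norm_num) hd10
    omega

-- ---------------------------------------------------------------------------
-- 7. B: the upward scan reaches exactly that least repeated number
-- ---------------------------------------------------------------------------

theorem pvIsRep_int_iff (j : Int) (h : 0 ≤ j) :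
    pvIsRep (PySem.Int.toChars j) = true ↔ pvRepN j.toNat := by
  rw [pvToChars_nonneg j h, pvIsRep_iff]
  unfold pvRepN pvPerP
  rfl

theorem pvScanUp_eq (fuel : Nat) : ∀ (m r : Int), m ≤ r →
    pvIsRep (PySem.Int.toChars r) = true →
    (∀ j, m ≤ j → j < r → pvIsRep (PySem.Int.toChars j) = false) →
    r - m < fuel → pvScanUp fuel m = r := by
  induction fuel with
  | zero =>
    intro m r h1 _ _ h4
    omega
  | succ fuel ih =>
    intro m r h1 h2 h3 h4
    simp only [pvScanUp]
    by_cases hm : m = r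
    · rw [if_pos (by rw [hm]; exact h2)]
      exact hm
    · rw [if_neg (by simpa using h3 m le_rfl (by omega))]
      exact ih (m + 1) r (by omega) h2 (fun j hj1 hj2 => h3 j (by omega) hj2) (by omega)

-- ===== VERDICT (by name: the statement is the Claim_ definition above) =====
theorem next_invalid_multiple_repeat_spec : Claim_equal_next_invalid_multiple_repeat := by
  intro n hDom hPre
  unfold Spec_next_invalid_multiple_repeat next_invalid_multiple_repeat
    next_invalid_multiple_repeat_alt
  have hPre' : (0:Int) ≤ n := hPre
  have hn2 : n ≤ 2147483648 := by
    unfold Dom_next_invalid_multiple_repeat pvDomInt at hDom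
    simp only [decide_eq_true_eq] at hDom
    exact hDom.2
  have hNle : n.toNat ≤ 2147483648 := by omega
  obtain ⟨hge, ⟨hlt, hrep, hmin⟩, hbound⟩ := pvA_least n.toNat hNle
  have hcast : ((n.toNat : Nat) : Int) = n := Int.toNat_of_nonneg hPre'
  rw [hcast] at hge hlt hrep hmin hbound
  symm
  apply pvScanUp_eq
  · omega
  · rw [pvIsRep_int_iff _ hge]
    exact hrep
  · intro j hj1 hj2
    by_contra hcontra
    have hj0 : (0:Int) ≤ j := by omega
    have := (pvIsRep_int_iff j hj0).mp (by simpa using hcontra)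
    have hle := hmin j.toNat (by omega) this
    omega
  · omega
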